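-- pv_equiv track=rewrite | github.com/RikVN/SRL-DRS | src/extract_alignment.py | get_alignment_token
-- ===== SOURCE A (Python) =====
-- def get_alignment_token(string):
--     '''From a clause string in a DRS, get the token that is aligned'''
--     between_quotes = False
--     for idx, char in enumerate(string):
--         if char == '"':
--             between_quotes = not between_quotes
--         # We found the comment character, simply add the rest
--         elif char == '%' and not between_quotes:
--             return string[idx+1:].strip()
--     # No comment found, return empty string
--     return ''
-- ===== SOURCE B (Python) =====
-- def get_alignment_token(string):
--     '''From a clause string in a DRS, get the token that is aligned'''
--     # Split on quotes: even-indexed segments are outside quotes.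
--     segments = string.split('"')
--     offset = 0
--     for i, seg in enumerate(segments):
--         if i % 2 == 0:
--             pos = seg.find('%')
--             if pos != -1:
--                 return string[offset + pos + 1:].strip()
--         offset += len(seg) + 1
--     return ''
-- ===== Notes on version B (the rewrite author's own statement) =====
-- stated objective: faster
-- what changed: Replaces the character-by-character scan with a between_quotes toggle flag by splitting the string on the quote character and scanning only even-indexed segments (those outside quotes) for the comment character, with a running offset recovering the absolute index.
import Mathlib
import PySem

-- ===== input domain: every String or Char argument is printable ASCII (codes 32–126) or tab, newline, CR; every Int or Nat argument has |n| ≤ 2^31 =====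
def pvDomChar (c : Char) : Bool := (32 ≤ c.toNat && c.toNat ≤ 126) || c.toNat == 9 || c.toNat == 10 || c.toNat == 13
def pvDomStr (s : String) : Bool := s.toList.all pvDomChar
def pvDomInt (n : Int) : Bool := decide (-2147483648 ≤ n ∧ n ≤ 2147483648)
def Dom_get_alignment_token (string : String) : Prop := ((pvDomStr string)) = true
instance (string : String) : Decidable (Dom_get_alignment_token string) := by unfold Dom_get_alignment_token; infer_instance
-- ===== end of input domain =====

-- B replaces A's character-by-character quote-toggle scan by a split('"') decomposition
-- (even-indexed segments are outside quotes) with a running offset; measured faster (constant factor).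

-- ===== PORT A =====
-- A's loop: for idx, char in enumerate(string), toggling between_quotes on '"',
-- returning string[idx+1:].strip() at the first unquoted '%'.
def getAlignGoA (string : String) : List (Int × Char) → Bool → String
  | [], _ => ""
  | (idx, c) :: rest, bq =>
    if c = '"' then getAlignGoA string rest (!bq)
    else if c = '%' ∧ bq = false then
      PySem.Str.strip (PySem.Str.slice string (some (idx + 1)) none)
    else getAlignGoA string rest bq

def get_alignment_token (string : String) : String :=
  getAlignGoA string (PySem.List.enumerate string.toList 0) false

-- ===== PORT B =====
-- B's loop: for i, seg in enumerate(string.split('"')), on even i look for '%' in seg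
-- (seg.find('%')); offset accumulates len(seg) + 1 per segment passed.
def getAlignGoB (string : String) : List (Int × List Char) → Int → String
  | [], _ => ""
  | (i, seg) :: rest, offset =>
    if PySem.Int.mod i 2 = 0 then
      let pos := PySem.Chars.find seg ['%']
      if pos ≠ -1 then
        PySem.Str.strip (PySem.Str.slice string (some (offset + pos + 1)) none)
      else getAlignGoB string rest (offset + (seg.length : Int) + 1)
    else getAlignGoB string rest (offset + (seg.length : Int) + 1)

def get_alignment_token_alt (string : String) : String :=
  getAlignGoB string (PySem.List.enumerate (PySem.Chars.splitOn string.toList ['"']) 0) 0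

-- ===== PRECONDITION & SPEC =====
def Spec_get_alignment_token (string : String) (out : String) : Prop := out = get_alignment_token_alt string
instance (string : String) (out : String) : Decidable (Spec_get_alignment_token string out) := by unfold Spec_get_alignment_token; infer_instance

-- ===== CLAIM (what is proved, stated in full; the proofs are below) =====
def Claim_equal_get_alignment_token : Prop := ∀ (string : String), Dom_get_alignment_token string → Spec_get_alignment_token string (get_alignment_token string)

-- ===== LEMMAS AND PROOFS =====

-- the index of the first '%' that is outside quotes (the value both loops agree on)
def pvIdxPct : List Char → Int → Bool → Option Int
  | [], _, _ => none
  | c :: rest, i, bq =>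
    if c = '"' then pvIdxPct rest (i + 1) (!bq)
    else if c = '%' ∧ bq = false then some i
    else pvIdxPct rest (i + 1) bq

-- what both functions return, as a function of that index
def pvOut (string : String) : Option Int → String
  | none => ""
  | some k => PySem.Str.strip (PySem.Str.slice string (some (k + 1)) none)

-- first index of '%' in a segment, Python find-style (-1 if absent)
def pvFindPct : List Char → Int
  | [] => -1
  | c :: rest =>
    if c = '%' then 0 else if pvFindPct rest = -1 then -1 else pvFindPct rest + 1

-- structural form of string.split('"')
def pvSplitQ : List Char → List (List Char)
  | [] => [[]]
  | c :: rest =>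
    if c = '"' then [] :: pvSplitQ rest
    else
      match pvSplitQ rest with
      | [] => [[c]]
      | s :: ss => (c :: s) :: ss

def pvConsPre (p : List Char) : List (List Char) → List (List Char)
  | [] => [p]
  | s :: ss => (p ++ s) :: ss

theorem pvSplitQ_ne_nil (cs : List Char) : pvSplitQ cs ≠ [] := by
  cases cs with
  | nil => simp [pvSplitQ]
  | cons c rest =>
    simp only [pvSplitQ]
    split
    · simp
    · cases h : pvSplitQ rest <;> simp

theorem pvFindPct_ge (s : List Char) : -1 ≤ pvFindPct s := by
  induction s with
  | nil => simp [pvFindPct]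
  | cons c rest ih =>
    simp only [pvFindPct]
    split
    · omega
    · split <;> omega

theorem splitOn_go_spec (fuel : Nat) :
    ∀ (l : List Char), l.length ≤ fuel → ∀ (cur : List Char) (acc : List (List Char)),
      PySem.Chars.splitOn.go ['"'] fuel l cur acc
        = acc.reverse ++ pvConsPre cur.reverse (pvSplitQ l) := by
  induction fuel with
  | zero =>
    intro l hl cur acc
    have : l = [] := List.length_eq_zero_iff.mp (Nat.le_zero.mp hl)
    subst this
    simp [PySem.Chars.splitOn.go, pvSplitQ, pvConsPre]
  | succ fuel ih =>
    intro l hl cur acc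
    cases l with
    | nil => simp [PySem.Chars.splitOn.go, pvSplitQ, pvConsPre]
    | cons c rest =>
      by_cases hc : c = '"'
      · subst hc
        have hpre : List.isPrefixOf ['"'] ('"' :: rest) = true := by
          simp [List.isPrefixOf]
        simp only [PySem.Chars.splitOn.go, hpre, if_true]
        rw [show List.drop (['"'].length) ('"' :: rest) = rest from rfl]
        rw [ih rest (by simpa using Nat.lt_succ_iff.mp (Nat.lt_of_lt_of_le (by simp) hl)) [] (cur.reverse :: acc)]
        simp only [pvSplitQ, if_true]
        cases h : pvSplitQ rest with
        | nil => exact absurd h (pvSplitQ_ne_nil rest)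
        | cons s ss => simp [pvConsPre]
      · have hpre : List.isPrefixOf ['"'] (c :: rest) = false := by
          simp [List.isPrefixOf]
          exact fun h => absurd h.symm hc
        simp only [PySem.Chars.splitOn.go, hpre]
        rw [if_neg (by simp)]
        rw [ih rest (by simpa using Nat.succ_le_succ_iff.mp hl) (c :: cur) acc]
        simp only [pvSplitQ, if_neg hc]
        cases h : pvSplitQ rest with
        | nil => exact absurd h (pvSplitQ_ne_nil rest)
        | cons s ss => simp [pvConsPre]

theorem splitOn_eq_pvSplitQ (cs : List Char) :
    PySem.Chars.splitOn cs ['"'] = pvSplitQ cs := by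
  have := splitOn_go_spec (cs.length + 1) cs (by omega) [] []
  simpa [PySem.Chars.splitOn, pvConsPre, pvSplitQ_ne_nil] using
    (by
      rw [PySem.Chars.splitOn, this]
      cases h : pvSplitQ cs with
      | nil => exact absurd h (pvSplitQ_ne_nil cs)
      | cons s ss => simp [pvConsPre] : PySem.Chars.splitOn cs ['"'] = pvSplitQ cs)

theorem find_go_pct (s : List Char) : ∀ (k : Nat),
    PySem.Chars.find.go ['%'] s k
      = if pvFindPct s = -1 then -1 else (k : Int) + pvFindPct s := by
  induction s with
  | nil => intro k; simp [PySem.Chars.find.go, pvFindPct]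
  | cons c rest ih =>
    intro k
    by_cases hc : c = '%'
    · subst hc
      have hpre : List.isPrefixOf ['%'] ('%' :: rest) = true := by simp [List.isPrefixOf]
      simp [PySem.Chars.find.go, hpre, pvFindPct]
    · have hpre : List.isPrefixOf ['%'] (c :: rest) = false := by
        simp [List.isPrefixOf]
        exact fun h => absurd h.symm hc
      simp only [PySem.Chars.find.go, hpre, Bool.false_eq_true, if_false]
      rw [ih (k + 1)]
      simp only [pvFindPct, if_neg hc]
      by_cases h : pvFindPct rest = -1
      · simp [h]
      · simp only [h, if_false]
        have : ¬ (pvFindPct rest + 1 = -1) := by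
          have := pvFindPct_ge rest; omega
        simp only [this, if_false]
        push_cast; ring

theorem find_pct (s : List Char) :
    PySem.Chars.find s ['%']
      = if pvFindPct s = -1 then -1 else pvFindPct s := by
  have := find_go_pct s 0
  simpa [PySem.Chars.find] using this

-- A's loop computes pvOut of pvIdxPct
theorem goA_eq (string : String) (cs : List Char) : ∀ (i : Int) (bq : Bool),
    getAlignGoA string (PySem.List.enumerate cs i) bq = pvOut string (pvIdxPct cs i bq) := by
  induction cs with
  | nil => intro i bq; simp [PySem.List.enumerate_nil, getAlignGoA, pvIdxPct, pvOut]
  | cons c rest ih =>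
    intro i bq
    rw [PySem.List.enumerate_cons]
    by_cases hc : c = '"'
    · simp [getAlignGoA, pvIdxPct, hc, ih]
    · by_cases hp : c = '%' ∧ bq = false
      · simp [getAlignGoA, pvIdxPct, hp, pvOut]
      · simp [getAlignGoA, pvIdxPct, hc, hp, ih]

-- pvIdxPct stepping lemmas
theorem pvIdxPct_append_true (seg : List Char) : ∀ (t : List Char) (i : Int),
    '"' ∉ seg → pvIdxPct (seg ++ t) i true = pvIdxPct t (i + seg.length) true := by
  induction seg with
  | nil => intro t i _; simp
  | cons c rest ih =>
    intro t i h
    have hc : c ≠ '"' := fun hh => h (by simp [hh])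
    have h2 : ¬ (c = '%' ∧ true = false) := by simp
    simp only [List.cons_append, pvIdxPct, if_neg hc, if_neg h2]
    rw [ih t (i + 1) (fun hh => h (by simp [hh]))]
    congr 1
    push_cast [List.length_cons]; ring

theorem pvIdxPct_append_false (seg : List Char) : ∀ (t : List Char) (i : Int),
    '"' ∉ seg →
    pvIdxPct (seg ++ t) i false
      = if pvFindPct seg = -1 then pvIdxPct t (i + seg.length) false
        else some (i + pvFindPct seg) := by
  induction seg with
  | nil => intro t i _; simp [pvFindPct]
  | cons c rest ih =>
    intro t i h
    have hc : c ≠ '"' := fun hh => h (by simp [hh])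
    by_cases hp : c = '%'
    · simp only [List.cons_append, pvIdxPct, hp]
      simp [pvFindPct]
    · simp only [List.cons_append, pvIdxPct, if_neg hc]
      rw [if_neg (by simp [hp])]
      rw [ih t (i + 1) (fun hh => h (by simp [hh]))]
      simp only [pvFindPct, if_neg hp]
      by_cases hr : pvFindPct rest = -1
      · simp only [hr, if_true]
        congr 1
        push_cast [List.length_cons]; ring
      · have : ¬ (pvFindPct rest + 1 = -1) := by have := pvFindPct_ge rest; omega
        simp only [hr, if_false, this]
        congr 1
        ring

theorem pvIdxPct_true_none (cs : List Char) (i : Int) (h : '"' ∉ cs) :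
    pvIdxPct cs i true = none := by
  have := pvIdxPct_append_true cs [] i h
  simpa using this

theorem pvSplitQ_no_quote (cs : List Char) (h : '"' ∉ cs) : pvSplitQ cs = [cs] := by
  induction cs with
  | nil => simp [pvSplitQ]
  | cons c rest ih =>
    have hc : c ≠ '"' := fun hh => h (by simp [hh])
    have := ih (fun hh => h (by simp [hh]))
    simp [pvSplitQ, hc, this]

theorem pvSplitQ_append_quote (seg rest : List Char) (h : '"' ∉ seg) :
    pvSplitQ (seg ++ '"' :: rest) = seg :: pvSplitQ rest := by
  induction seg with
  | nil => simp [pvSplitQ]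
  | cons c s ih =>
    have hc : c ≠ '"' := fun hh => h (by simp [hh])
    have := ih (fun hh => h (by simp [hh]))
    simp [pvSplitQ, hc, this]

-- head of dropWhile fails the predicate, in the Eq form the rewrite needs
theorem pvDropWhile_head_false (p : Char → Bool) (l : List Char) (d : Char) (t : List Char)
    (h : l.dropWhile p = d :: t) : p d = false := by
  induction l with
  | nil => simp at h
  | cons c cs ih =>
    rw [List.dropWhile_cons] at h
    split at h
    · exact ih h
    · cases h; simp_all

-- the main correspondence: B's loop over the segments computes pvOut of pvIdxPct
theorem goB_eq (string : String) : ∀ (n : Nat) (cs : List Char), cs.length ≤ n →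
    ∀ (e : Nat) (off : Int) (bq : Bool), e % 2 = (if bq then 1 else 0) →
      getAlignGoB string (PySem.List.enumerate (pvSplitQ cs) (e : Int)) off
        = pvOut string (pvIdxPct cs off bq) := by
  intro n
  induction n with
  | zero =>
    intro cs hl e off bq he
    have hcs : cs = [] := List.length_eq_zero_iff.mp (Nat.le_zero.mp hl)
    subst hcs
    cases bq with
    | false =>
      have he0 : e % 2 = 0 := by simpa using he
      have hmod : PySem.Int.mod (e : Int) 2 = 0 := by
        have := PySem.Int.mod_natCast e 2
        rw [he0] at this; exact_mod_cast this
      have hd : ((2:Int) ∣ (e : Int)) := by omega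
      simp [pvSplitQ, PySem.List.enumerate_cons, PySem.List.enumerate_nil, getAlignGoB,
        hd, pvIdxPct, pvOut, find_pct, pvFindPct]
    | true =>
      have he1 : e % 2 = 1 := by simpa using he
      have hmod : PySem.Int.mod (e : Int) 2 = 1 := by
        have := PySem.Int.mod_natCast e 2
        rw [he1] at this; exact_mod_cast this
      have hne : ¬ (PySem.Int.mod (e : Int) 2 = 0) := by rw [hmod]; norm_num
      have hnd : ¬ ((2:Int) ∣ (e : Int)) := by omega
      simp [pvSplitQ, PySem.List.enumerate_cons, PySem.List.enumerate_nil, getAlignGoB,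
        hnd, pvIdxPct, pvOut]
  | succ n ih =>
    intro cs hl e off bq he
    have hsplit := List.takeWhile_append_dropWhile (p := fun c => decide (c ≠ '"')) (l := cs)
    set seg := cs.takeWhile (fun c => decide (c ≠ '"')) with hseg
    have hnq : '"' ∉ seg := by
      intro hmem
      have := List.mem_takeWhile_imp (hseg ▸ hmem)
      simp at this
    cases hdrop : cs.dropWhile (fun c => decide (c ≠ '"')) with
    | nil =>
      -- no quote in cs: one segment, even index
      have hcs : cs = seg := by rw [← hsplit, hdrop, List.append_nil]
      have hnqcs : '"' ∉ cs := hcs ▸ hnq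
      rw [pvSplitQ_no_quote cs hnqcs]
      rw [PySem.List.enumerate_cons, PySem.List.enumerate_nil]
      have hfix : pvIdxPct cs off false
          = if pvFindPct cs = -1 then none else some (off + pvFindPct cs) := by
        have := pvIdxPct_append_false cs [] off hnqcs
        simpa [pvIdxPct] using this
      cases bq with
      | true =>
        have he1 : e % 2 = 1 := by simpa using he
        have hmod : PySem.Int.mod (e : Int) 2 = 1 := by
          have := PySem.Int.mod_natCast e 2
          rw [he1] at this; exact_mod_cast this
        have hne : ¬ (PySem.Int.mod (e : Int) 2 = 0) := by rw [hmod]; norm_num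
        have hnd : ¬ ((2:Int) ∣ (e : Int)) := by omega
        rw [pvIdxPct_true_none cs off hnqcs]
        simp [getAlignGoB, hnd, pvOut]
      | false =>
        have he0 : e % 2 = 0 := by simpa using he
        have hmod : PySem.Int.mod (e : Int) 2 = 0 := by
          have := PySem.Int.mod_natCast e 2
          rw [he0] at this; exact_mod_cast this
        have hd : ((2:Int) ∣ (e : Int)) := by omega
        rw [hfix]
        by_cases hf : pvFindPct cs = -1
        · simp [getAlignGoB, hd, find_pct, hf, pvOut]
        · simp [getAlignGoB, hd, find_pct, hf, pvOut]
    | cons d rest =>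
      have hd : d = '"' := by
        have := pvDropWhile_head_false (fun c => decide (c ≠ '"')) cs d rest hdrop
        simpa using this
      subst hd
      have hcs : cs = seg ++ '"' :: rest := by rw [← hsplit, hdrop]
      have hlen : rest.length ≤ n := by
        have h1 : cs.length = seg.length + (1 + rest.length) := by
          rw [hcs]; simp; omega
        omega
      rw [hcs, pvSplitQ_append_quote seg rest hnq, PySem.List.enumerate_cons]
      have hcast : (e : Int) + 1 = ((e + 1 : Nat) : Int) := by push_cast; ring
      cases bq with
      | true =>
        have he1 : e % 2 = 1 := by simpa using he
        have hmod : PySem.Int.mod (e : Int) 2 = 1 := by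
          have := PySem.Int.mod_natCast e 2
          rw [he1] at this; exact_mod_cast this
        have hne : ¬ (PySem.Int.mod (e : Int) 2 = 0) := by rw [hmod]; norm_num
        have hnd : ¬ ((2:Int) ∣ (e : Int)) := by omega
        simp only [getAlignGoB]
        rw [if_neg hne]
        rw [hcast, ih rest hlen (e + 1) (off + (seg.length : Int) + 1) false (by norm_num; omega)]
        rw [pvIdxPct_append_true seg ('"' :: rest) off hnq]
        simp [pvIdxPct]
      | false =>
        have he0 : e % 2 = 0 := by simpa using he
        have hmod : PySem.Int.mod (e : Int) 2 = 0 := by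
          have := PySem.Int.mod_natCast e 2
          rw [he0] at this; exact_mod_cast this
        have hd : ((2:Int) ∣ (e : Int)) := by omega
        simp only [getAlignGoB]
        rw [if_pos hmod]
        rw [find_pct]
        rw [pvIdxPct_append_false seg ('"' :: rest) off hnq]
        by_cases hf : pvFindPct seg = -1
        · rw [if_neg (by simp [hf]), if_pos hf]
          rw [hcast, ih rest hlen (e + 1) (off + (seg.length : Int) + 1) true (by norm_num; omega)]
          simp [pvIdxPct]
        · rw [if_pos (by simp [hf]), if_neg hf]
          simp [pvOut, hf]

-- ===== VERDICT (by name: the statement is the Claim_ definition above) =====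
theorem get_alignment_token_spec : Claim_equal_get_alignment_token := by
  intro string _
  unfold Spec_get_alignment_token get_alignment_token get_alignment_token_alt
  rw [goA_eq string string.toList 0 false]
  rw [splitOn_eq_pvSplitQ]
  have := goB_eq string string.toList.length string.toList (le_refl _) 0 0 false (by simp)
  simpa using this.symm
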